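-- pv_equiv track=rewrite | github.com/mxgiagnorio/Ejercitacion1UNGS | parcial.py | digitos
-- ===== SOURCE A (Python) =====
-- def digitos(numero):
--
--     numero_str = str(numero)
--     longitud = len(numero_str)
--
--     # Si la longitud es menor que 4, rellenamos con ceros
--     if longitud < 4:
--         ceros_necesarios = 4 - longitud
--         ultimos_4_digitos = '0' * ceros_necesarios + numero_str
--     else:
--         # Construir manualmente los últimos 4 dígitos sin rebanado
--         ultimos_4_digitos = ''
--         for i in range(longitud - 4, longitud):
--             ultimos_4_digitos += numero_str[i]
--
--     return ultimos_4_digitos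
-- ===== SOURCE B (Python) =====
-- def digitos(numero):
--     return ('0000' + str(numero))[-4:]
-- ===== Notes on version B (the rewrite author's own statement) =====
-- stated objective: simpler
-- what changed: Replaces the length check, manual zero padding and the character-appending index loop by one branchless expression: prepend four zeros and take the last four characters with a slice.
import Mathlib
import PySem

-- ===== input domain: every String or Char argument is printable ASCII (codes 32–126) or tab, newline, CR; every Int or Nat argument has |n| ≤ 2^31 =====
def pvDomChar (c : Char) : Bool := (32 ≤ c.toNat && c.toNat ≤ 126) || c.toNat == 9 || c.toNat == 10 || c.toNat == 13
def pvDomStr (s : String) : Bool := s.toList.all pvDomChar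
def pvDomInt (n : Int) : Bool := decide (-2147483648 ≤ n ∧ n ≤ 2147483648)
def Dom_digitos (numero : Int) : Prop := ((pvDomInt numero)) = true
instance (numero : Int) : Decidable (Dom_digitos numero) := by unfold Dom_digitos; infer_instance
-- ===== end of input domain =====

-- B replaces A's length check, manual padding and index loop by the single
-- branchless expression ('0000' + str(numero))[-4:]; return values proved equal.

-- ===== PORT A =====
def digitos (numero : Int) : String :=
  let numeroStr : List Char := PySem.Int.toChars numero
  let longitud : Int := PySem.List.len numeroStr
  if longitud < 4 then
    let cerosNecesarios := 4 - longitud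
    String.ofList (List.replicate cerosNecesarios.toNat '0' ++ numeroStr)
  else
    String.ofList ((PySem.List.pyRange (longitud - 4) longitud 1).foldl
      (fun acc i => acc ++ [PySem.List.pyGetD numeroStr i ' ']) [])

-- ===== PORT B =====
def digitos_alt (numero : Int) : String :=
  String.ofList (PySem.List.slice (('0' :: '0' :: '0' :: '0' :: []) ++ PySem.Int.toChars numero)
    (some (-4)) none)

-- ===== PRECONDITION & SPEC =====
def Spec_digitos (numero : Int) (out : String) : Prop := out = digitos_alt numero
instance (numero : Int) (out : String) : Decidable (Spec_digitos numero out) := by unfold Spec_digitos; infer_instance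

-- ===== CLAIM (what is proved, stated in full; the proofs are below) =====
def Claim_equal_digitos : Prop := ∀ (numero : Int), Dom_digitos numero → Spec_digitos numero (digitos numero)

-- ===== LEMMAS AND PROOFS =====

-- ===== VERDICT (by name: the statement is the Claim_ definition above) =====
theorem digitos_spec : Claim_equal_digitos := by
  intro numero _
  unfold Spec_digitos digitos digitos_alt
  simp only [PySem.List.len_eq]
  rw [PySem.List.slice_from_neg_ofNat _ 4 (by omega)]
  set s := PySem.Int.toChars numero with hs
  simp only [List.length_append, List.length_cons, List.length_nil]
  by_cases h : (s.length : Int) < 4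
  · simp only [h, if_true]
    have hn : s.length < 4 := by exact_mod_cast h
    congr 1
    have hdrop : (('0' :: '0' :: '0' :: '0' :: []) ++ s).drop s.length
        = List.replicate (4 - s.length) '0' ++ s := by
      interval_cases hL : s.length <;> simp_all
    rw [show 0 + 4 + s.length - 4 = s.length by omega, hdrop]
    congr 2
    omega
  · simp only [h, if_false]
    have h4 : 4 ≤ s.length := by omega
    congr 1
    rw [PySem.List.foldl_pyRange_pyGetD' s ' ' (fun acc c => acc ++ [c]) []
          (show (0:Int) ≤ (s.length : Int) - 4 by omega),
        PySem.List.foldl_append_singleton]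
    simp only [List.nil_append]
    rw [show ((s.length : Int) - 4).toNat = s.length - 4 by omega,
        show 0 + 4 + s.length - 4
            = (('0' :: '0' :: '0' :: '0' :: []) : List Char).length + (s.length - 4) by
          simp; omega,
        List.drop_append]
    simp [List.drop_eq_nil_of_le]
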